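-- pv_equiv track=rewrite | github.com/queelius/computational-explorations | src/verifiable_attacks.py | powerful_numbers_up_to
-- ===== SOURCE A (Python) =====
-- from typing import List, Tuple, Dict, Optional, Set
--
-- def powerful_numbers_up_to(N: int) -> List[int]:
--     """
--     Enumerate all powerful numbers up to N.
--
--     A powerful number has the form a²·b³ where a,b ≥ 1.
--     Uses the a²·b³ representation for efficiency.
--     """
--     if N < 1:
--         return []
--
--     result = set()
--     # n = a² · b³ for all a, b with a²·b³ ≤ N
--     b = 1
--     while b * b * b <= N:
--         a = 1
--         while a * a * b * b * b <= N:
--             result.add(a * a * b * b * b)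
--             a += 1
--         b += 1
--     return sorted(result)
-- ===== SOURCE B (Python) =====
-- def powerful_numbers_up_to(N: int):
--     """Build one strictly increasing run [a*a*cube for a = 1.. ] per cube b**3 <= N,
--     then combine the sorted runs by balanced rounds of two-way merging that drops
--     duplicates on the fly -- no hash set and no comparison sort."""
--
--     def merge_dedup(xs, ys):
--         out = []
--         i = j = 0
--         while i < len(xs) and j < len(ys):
--             x = xs[i]
--             y = ys[j]
--             if x < y:
--                 out.append(x)
--                 i += 1
--             elif y < x:
--                 out.append(y)
--                 j += 1
--             else:
--                 out.append(x)
--                 i += 1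
--                 j += 1
--         out.extend(xs[i:])
--         out.extend(ys[j:])
--         return out
--
--     runs = []
--     b = 1
--     while b * b * b <= N:
--         cube = b * b * b
--         run = []
--         a = 1
--         while a * a * cube <= N:
--             run.append(a * a * cube)
--             a += 1
--         runs.append(run)
--         b += 1
--
--     if not runs:
--         return []
--     while len(runs) > 1:
--         merged = []
--         for k in range(0, len(runs) - 1, 2):
--             merged.append(merge_dedup(runs[k], runs[k + 1]))
--         if len(runs) % 2 == 1:
--             merged.append(runs[-1])
--         runs = merged
--     return runs[0]
-- ===== Notes on version B (the rewrite author's own statement) =====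
-- stated objective: alternative
-- what changed: Keeps the a^2*b^3 generation bound but replaces A's hash-set deduplication plus final comparison sort by building one strictly increasing run per cube b^3 and combining the runs with balanced rounds of two-way merging that drops duplicates during the merge, so the output is assembled already sorted with no set and no sort.
import Mathlib
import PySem

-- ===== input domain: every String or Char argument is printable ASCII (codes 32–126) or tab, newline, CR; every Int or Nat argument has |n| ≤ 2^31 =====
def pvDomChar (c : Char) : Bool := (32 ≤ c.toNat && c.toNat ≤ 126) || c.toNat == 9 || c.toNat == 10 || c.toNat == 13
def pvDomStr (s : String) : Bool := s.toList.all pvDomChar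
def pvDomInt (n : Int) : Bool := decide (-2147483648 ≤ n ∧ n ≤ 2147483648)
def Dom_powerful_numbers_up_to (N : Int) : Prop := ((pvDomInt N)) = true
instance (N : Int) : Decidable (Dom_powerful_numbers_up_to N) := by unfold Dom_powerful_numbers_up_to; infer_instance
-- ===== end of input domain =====

-- B keeps A's a²·b³ generation bound but replaces the hash set + final sort by per-cube
-- strictly increasing runs combined with balanced rounds of dedup-merging (objective: alternative).
-- Each Python while loop is ported with a fuel argument that only makes the recursion structural;
-- the callers pass fuel that provably exceeds the loop's iteration count.

-- ===== PORT A =====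
-- inner 'while a*a*b*b*b <= N' loop
def pvAInner : Nat → Int → Int → Int → PySem.Set Int → PySem.Set Int
  | 0, _N, _b, _a, s => s
  | fuel + 1, N, b, a, s =>
    if a * a * b * b * b ≤ N then
      pvAInner fuel N b (a + 1) (PySem.Set.add s (a * a * b * b * b))
    else s

-- outer 'while b*b*b <= N' loop
def pvAOuter : Nat → Int → Int → PySem.Set Int → PySem.Set Int
  | 0, _N, _b, s => s
  | fuel + 1, N, b, s =>
    if b * b * b ≤ N then
      pvAOuter fuel N (b + 1) (pvAInner (N + 1).toNat N b 1 s)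
    else s

def powerful_numbers_up_to (N : Int) : List Int :=
  if N < 1 then []
  else PySem.List.sorted (pvAOuter (N + 1).toNat N 1 (PySem.Set.empty : PySem.Set Int)) (fun x => x) false

-- ===== PORT B =====
-- merge_dedup's index loop, as forward recursion on the two unread suffixes
def pvMergeDedup : Nat → List Int → List Int → List Int
  | 0, xs, ys => xs ++ ys
  | _fuel + 1, [], ys => ys
  | _fuel + 1, x :: xs, [] => x :: xs
  | fuel + 1, x :: xs, y :: ys =>
    if x < y then x :: pvMergeDedup fuel xs (y :: ys)
    else if y < x then y :: pvMergeDedup fuel (x :: xs) ys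
    else x :: pvMergeDedup fuel xs ys

def pvMerge (xs ys : List Int) : List Int := pvMergeDedup (xs.length + ys.length) xs ys

-- inner 'while a*a*cube <= N' run builder
def pvRun : Nat → Int → Int → Int → List Int → List Int
  | 0, _N, _b, _a, run => run
  | fuel + 1, N, b, a, run =>
    if a * a * (b * b * b) ≤ N then
      pvRun fuel N b (a + 1) (run ++ [a * a * (b * b * b)])
    else run

-- outer 'while b*b*b <= N' loop collecting the runs
def pvRuns : Nat → Int → Int → List (List Int) → List (List Int)
  | 0, _N, _b, runs => runs
  | fuel + 1, N, b, runs =>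
    if b * b * b ≤ N then
      pvRuns fuel N (b + 1) (runs ++ [pvRun (N + 1).toNat N b 1 []])
    else runs

-- one 'for k in range(0, len(runs)-1, 2)' round (odd last run carried over)
def pvPairRound : List (List Int) → List (List Int)
  | [] => []
  | [r] => [r]
  | r1 :: r2 :: rest => pvMerge r1 r2 :: pvPairRound rest

-- 'while len(runs) > 1' rounds loop
def pvRounds : Nat → List (List Int) → List (List Int)
  | 0, runs => runs
  | fuel + 1, runs =>
    if 1 < runs.length then pvRounds fuel (pvPairRound runs) else runs

def powerful_numbers_up_to_alt (N : Int) : List Int :=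
  let runs := pvRuns (N + 1).toNat N 1 []
  if runs = [] then []
  else (pvRounds runs.length runs).headD []

-- ===== PRECONDITION & SPEC =====
def Spec_powerful_numbers_up_to (N : Int) (out : List Int) : Prop := out = powerful_numbers_up_to_alt N
instance (N : Int) (out : List Int) : Decidable (Spec_powerful_numbers_up_to N out) := by unfold Spec_powerful_numbers_up_to; infer_instance

-- ===== CLAIM (what is proved, stated in full; the proofs are below) =====
def Claim_equal_powerful_numbers_up_to : Prop := ∀ (N : Int), Dom_powerful_numbers_up_to N → Spec_powerful_numbers_up_to N (powerful_numbers_up_to N)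

-- ===== LEMMAS AND PROOFS =====

theorem pv_le_sq_cube {a b : Int} (ha : 1 ≤ a) (hb : 1 ≤ b) : a ≤ a * a * b * b * b := by
  have hb3 : (1:Int) ≤ b * b * b := by nlinarith
  have haa : a ≤ a * a := by nlinarith
  have h5 : a * a ≤ a * a * (b * b * b) := by
    nlinarith [mul_nonneg (mul_nonneg (by omega : (0:Int) ≤ a) (by omega : (0:Int) ≤ a))
      (by omega : (0:Int) ≤ b * b * b - 1)]
  have h6 : a * a * (b * b * b) = a * a * b * b * b := by ring
  linarith

theorem pv_cube_mono {b c a : Int} (hb : 1 ≤ b) (h : b ≤ c) (ha : 1 ≤ a) :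
    b * b * b ≤ a * a * c * c * c := by
  have hc : 1 ≤ c := le_trans hb h
  have h0 : b * b ≤ c * c := by nlinarith
  have h1 : b * b * b ≤ c * c * c := by nlinarith
  have h2 : 0 < c * c * c := by nlinarith
  have h3 : 1 ≤ a * a := by nlinarith
  nlinarith

theorem pv_sq_mono {a a' c : Int} (ha : 1 ≤ a) (h : a ≤ a') (hc : 1 ≤ c) :
    a * a * c * c * c ≤ a' * a' * c * c * c := by
  have h0 : (0:Int) ≤ a := by omega
  have h1 : a * a ≤ a' * a' := by nlinarith
  have h2 : 0 < c * c * c := by nlinarith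
  nlinarith

theorem pv_sq_strict {a a' c : Int} (ha : 1 ≤ a) (h : a < a') (hc : 1 ≤ c) :
    a * a * c * c * c < a' * a' * c * c * c := by
  have h0 : (0:Int) ≤ a := by omega
  have h1 : a * a < a' * a' := by nlinarith
  have h2 : 0 < c * c * c := by nlinarith
  nlinarith

theorem pv_group (a b : Int) : a * a * (b * b * b) = a * a * b * b * b := by ring

-- ===== A-side loop characterisations =====

theorem pvAInner_mem (fuel : Nat) (N b a : Int) (s : PySem.Set Int) (ha : 1 ≤ a) (hb : 1 ≤ b)
    (hf : N + 1 - a ≤ fuel) (x : Int) :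
    x ∈ pvAInner fuel N b a s ↔
      x ∈ s ∨ ∃ a' : Int, a ≤ a' ∧ a' * a' * b * b * b ≤ N ∧ x = a' * a' * b * b * b := by
  induction fuel generalizing a s with
  | zero =>
    simp only [pvAInner]
    constructor
    · exact Or.inl
    · rintro (hx | ⟨a', h1, h2, rfl⟩)
      · exact hx
      · have h3 := pv_le_sq_cube (le_trans ha h1) hb
        omega
  | succ fuel ih =>
    simp only [pvAInner]
    split
    · rename_i h
      rw [ih (a + 1) _ (by omega) (by omega), PySem.Set.mem_add]
      constructor
      · rintro ((hx | rfl) | ⟨a', h1, h2, rfl⟩)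
        · exact Or.inl hx
        · exact Or.inr ⟨a, le_refl a, h, rfl⟩
        · exact Or.inr ⟨a', by omega, h2, rfl⟩
      · rintro (hx | ⟨a', h1, h2, rfl⟩)
        · exact Or.inl (Or.inl hx)
        · rcases lt_or_eq_of_le h1 with h' | rfl
          · exact Or.inr ⟨a', by omega, h2, rfl⟩
          · exact Or.inl (Or.inr rfl)
    · rename_i h
      constructor
      · exact Or.inl
      · rintro (hx | ⟨a', h1, h2, rfl⟩)
        · exact hx
        · exact absurd h2 (by have := pv_sq_mono ha h1 hb; omega)

theorem pvAInner_nodup (fuel : Nat) (N b a : Int) (s : PySem.Set Int)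
    (hs : s.Nodup) : (pvAInner fuel N b a s).Nodup := by
  induction fuel generalizing a s with
  | zero => exact hs
  | succ fuel ih =>
    simp only [pvAInner]
    split
    · exact ih _ _ (PySem.Set.nodup_add _ _ hs)
    · exact hs

theorem pvAOuter_mem (fuel : Nat) (N b : Int) (s : PySem.Set Int) (hb : 1 ≤ b)
    (hf : N + 1 - b ≤ fuel) (x : Int) :
    x ∈ pvAOuter fuel N b s ↔
      x ∈ s ∨ ∃ c a : Int, b ≤ c ∧ 1 ≤ a ∧ a * a * c * c * c ≤ N ∧ x = a * a * c * c * c := by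
  induction fuel generalizing b s with
  | zero =>
    simp only [pvAOuter]
    constructor
    · exact Or.inl
    · rintro (hx | ⟨c, a, h1, h2, h3, rfl⟩)
      · exact hx
      · have h4 : b ≤ b * b * b := by nlinarith
        have h5 := pv_cube_mono hb h1 h2
        omega
  | succ fuel ih =>
    simp only [pvAOuter]
    split
    · rename_i h
      have hN : 1 ≤ N := by have : b ≤ b * b * b := by nlinarith
                            omega
      rw [ih (b + 1) _ (by omega) (by omega),
          pvAInner_mem (N + 1).toNat N b 1 s (by omega) hb (by omega)]
      constructor
      · rintro ((hx | ⟨a', h1, h2, rfl⟩) | ⟨c, a, h1, h2, h3, rfl⟩)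
        · exact Or.inl hx
        · exact Or.inr ⟨b, a', le_refl b, h1, h2, rfl⟩
        · exact Or.inr ⟨c, a, by omega, h2, h3, rfl⟩
      · rintro (hx | ⟨c, a, h1, h2, h3, rfl⟩)
        · exact Or.inl (Or.inl hx)
        · rcases lt_or_eq_of_le h1 with h' | rfl
          · exact Or.inr ⟨c, a, by omega, h2, h3, rfl⟩
          · exact Or.inl (Or.inr ⟨a, h2, h3, rfl⟩)
    · rename_i h
      constructor
      · exact Or.inl
      · rintro (hx | ⟨c, a, h1, h2, h3, rfl⟩)
        · exact hx
        · exact absurd h3 (by have := pv_cube_mono hb h1 h2; omega)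

theorem pvAOuter_nodup (fuel : Nat) (N b : Int) (s : PySem.Set Int)
    (hs : s.Nodup) : (pvAOuter fuel N b s).Nodup := by
  induction fuel generalizing b s with
  | zero => exact hs
  | succ fuel ih =>
    simp only [pvAOuter]
    split
    · exact ih _ _ (pvAInner_nodup _ N b 1 s hs)
    · exact hs

-- ===== B-side: merge =====

theorem pvMergeDedup_spec (fuel : Nat) :
    ∀ (xs ys : List Int), xs.length + ys.length ≤ fuel →
      xs.Pairwise (· < ·) → ys.Pairwise (· < ·) →
      (pvMergeDedup fuel xs ys).Pairwise (· < ·) ∧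
      (∀ z, z ∈ pvMergeDedup fuel xs ys ↔ z ∈ xs ∨ z ∈ ys) := by
  induction fuel with
  | zero =>
    intro xs ys hf hx hy
    have hxe : xs = [] := List.eq_nil_of_length_eq_zero (by omega)
    have hye : ys = [] := List.eq_nil_of_length_eq_zero (by omega)
    subst hxe; subst hye
    simp [pvMergeDedup]
  | succ fuel ih =>
    intro xs ys hf hx hy
    match xs, ys with
    | [], ys => simpa [pvMergeDedup] using hy
    | x :: xs, [] => simpa [pvMergeDedup] using hx
    | x :: xs, y :: ys =>
      simp only [List.length_cons] at hf
      obtain ⟨hx1, hx2⟩ := List.pairwise_cons.mp hx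
      obtain ⟨hy1, hy2⟩ := List.pairwise_cons.mp hy
      by_cases h1 : x < y
      · obtain ⟨hp, hm⟩ := ih xs (y :: ys) (by simp; omega) hx2 hy
        have he : pvMergeDedup (fuel + 1) (x :: xs) (y :: ys)
            = x :: pvMergeDedup fuel xs (y :: ys) := by
          simp [pvMergeDedup, h1]
        rw [he]
        refine ⟨List.pairwise_cons.mpr ⟨?_, hp⟩, ?_⟩
        · intro z hz
          rcases (hm z).mp hz with hzx | hzy
          · exact hx1 z hzx
          · rcases List.mem_cons.mp hzy with rfl | hzy'
            · exact h1
            · exact lt_trans h1 (hy1 z hzy')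
        · intro z
          simp only [List.mem_cons, hm z, List.mem_cons]
          tauto
      · by_cases h2 : y < x
        · obtain ⟨hp, hm⟩ := ih (x :: xs) ys (by simp; omega) hx hy2
          have he : pvMergeDedup (fuel + 1) (x :: xs) (y :: ys)
              = y :: pvMergeDedup fuel (x :: xs) ys := by
            simp [pvMergeDedup, h1, h2]
          rw [he]
          refine ⟨List.pairwise_cons.mpr ⟨?_, hp⟩, ?_⟩
          · intro z hz
            rcases (hm z).mp hz with hzx | hzy
            · rcases List.mem_cons.mp hzx with rfl | hzx'
              · exact h2
              · exact lt_trans h2 (hx1 z hzx')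
            · exact hy1 z hzy
          · intro z
            simp only [List.mem_cons, hm z, List.mem_cons]
            tauto
        · have hxy : x = y := by omega
          subst hxy
          obtain ⟨hp, hm⟩ := ih xs ys (by omega) hx2 hy2
          have he : pvMergeDedup (fuel + 1) (x :: xs) (x :: ys)
              = x :: pvMergeDedup fuel xs ys := by
            simp [pvMergeDedup, h1]
          rw [he]
          refine ⟨List.pairwise_cons.mpr ⟨?_, hp⟩, ?_⟩
          · intro z hz
            rcases (hm z).mp hz with hzx | hzy
            · exact hx1 z hzx
            · exact hy1 z hzy
          · intro z
            simp only [List.mem_cons, hm z]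
            tauto

theorem pvMerge_spec (xs ys : List Int) (hx : xs.Pairwise (· < ·)) (hy : ys.Pairwise (· < ·)) :
    (pvMerge xs ys).Pairwise (· < ·) ∧ (∀ z, z ∈ pvMerge xs ys ↔ z ∈ xs ∨ z ∈ ys) :=
  pvMergeDedup_spec (xs.length + ys.length) xs ys (le_refl _) hx hy

-- ===== B-side: one pairing round =====

theorem pvPairRound_spec (runs : List (List Int)) (h : ∀ r ∈ runs, r.Pairwise (· < ·)) :
    (∀ r ∈ pvPairRound runs, r.Pairwise (· < ·)) ∧
    (∀ z, (∃ r ∈ pvPairRound runs, z ∈ r) ↔ ∃ r ∈ runs, z ∈ r) := by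
  fun_induction pvPairRound runs with
  | case1 => exact ⟨fun r hr => (h r hr), fun z => Iff.rfl⟩
  | case2 r => exact ⟨fun r' hr' => h r' hr', fun z => Iff.rfl⟩
  | case3 r1 r2 rest ih =>
    have hr1 : r1.Pairwise (· < ·) := h r1 (by simp)
    have hr2 : r2.Pairwise (· < ·) := h r2 (by simp)
    obtain ⟨hmp, hmm⟩ := pvMerge_spec r1 r2 hr1 hr2
    obtain ⟨ihp, ihm⟩ := ih (fun r hr => h r (by simp [hr]))
    constructor
    · intro r hr
      rcases List.mem_cons.mp hr with rfl | hr'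
      · exact hmp
      · exact ihp r hr'
    · intro z
      constructor
      · rintro ⟨r, hr, hz⟩
        rcases List.mem_cons.mp hr with rfl | hr'
        · rcases (hmm z).mp hz with h' | h'
          · exact ⟨r1, by simp, h'⟩
          · exact ⟨r2, by simp, h'⟩
        · obtain ⟨r', hr'', hz'⟩ := (ihm z).mp ⟨r, hr', hz⟩
          exact ⟨r', by simp [hr''], hz'⟩
      · rintro ⟨r, hr, hz⟩
        rcases List.mem_cons.mp hr with rfl | hr'
        · exact ⟨pvMerge r r2, by simp, (hmm z).mpr (Or.inl hz)⟩
        · rcases List.mem_cons.mp hr' with rfl | hr''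
          · exact ⟨pvMerge r1 r, by simp, (hmm z).mpr (Or.inr hz)⟩
          · obtain ⟨r', hr3, hz'⟩ := (ihm z).mpr ⟨r, hr'', hz⟩
            exact ⟨r', by simp [hr3], hz'⟩

theorem pvPairRound_length_le (runs : List (List Int)) :
    (pvPairRound runs).length ≤ runs.length := by
  fun_induction pvPairRound runs with
  | case1 => simp [pvPairRound]
  | case2 r => simp [pvPairRound]
  | case3 r1 r2 rest ih => simp [pvPairRound]; omega

theorem pvPairRound_ne_nil (runs : List (List Int)) (h : runs ≠ []) : pvPairRound runs ≠ [] := by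
  match runs with
  | [] => exact absurd rfl h
  | [r] => simp [pvPairRound]
  | r1 :: r2 :: rest => simp [pvPairRound]

theorem pvPairRound_length_lt (runs : List (List Int)) (h : 1 < runs.length) :
    (pvPairRound runs).length < runs.length := by
  match runs with
  | [] => simp at h
  | [r] => simp at h
  | r1 :: r2 :: rest =>
    have := pvPairRound_length_le rest
    simp [pvPairRound]
    omega

-- ===== B-side: the rounds loop collapses to a single sorted run =====

theorem pvRounds_spec (fuel : Nat) :
    ∀ (runs : List (List Int)), runs ≠ [] → runs.length ≤ fuel →
      (∀ r ∈ runs, r.Pairwise (· < ·)) →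
      ∃ r, pvRounds fuel runs = [r] ∧ r.Pairwise (· < ·) ∧
        (∀ z, z ∈ r ↔ ∃ r' ∈ runs, z ∈ r') := by
  induction fuel with
  | zero =>
    intro runs hne hf _
    exact absurd (List.eq_nil_of_length_eq_zero (by omega)) hne
  | succ fuel ih =>
    intro runs hne hf h
    simp only [pvRounds]
    split
    · rename_i hlen
      obtain ⟨hp, hm⟩ := pvPairRound_spec runs h
      have hne' : pvPairRound runs ≠ [] :=
        pvPairRound_ne_nil runs (by intro h0; rw [h0] at hlen; simp at hlen)
      obtain ⟨r, hr, hrp, hrm⟩ := ih (pvPairRound runs) hne'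
        (by have := pvPairRound_length_lt runs hlen; omega) hp
      exact ⟨r, hr, hrp, fun z => (hrm z).trans (hm z)⟩
    · rename_i hlen
      obtain ⟨r, rfl⟩ : ∃ r, runs = [r] := by
        match runs with
        | [] => exact absurd rfl hne
        | [r] => exact ⟨r, rfl⟩
        | r1 :: r2 :: rest => simp at hlen
      refine ⟨r, rfl, h r (by simp), ?_⟩
      intro z; simp

-- ===== B-side: run generation =====

theorem pvRun_spec (fuel : Nat) (N b : Int) (hb : 1 ≤ b) :
    ∀ (a : Int) (run : List Int), 1 ≤ a → N + 1 - a ≤ fuel →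
      run.Pairwise (· < ·) → (∀ z ∈ run, z < a * a * (b * b * b)) →
      (pvRun fuel N b a run).Pairwise (· < ·) ∧
      (∀ z, z ∈ pvRun fuel N b a run ↔
        z ∈ run ∨ ∃ a' : Int, a ≤ a' ∧ a' * a' * b * b * b ≤ N ∧ z = a' * a' * b * b * b) := by
  induction fuel with
  | zero =>
    intro a run ha hf hp hbound
    simp only [pvRun]
    refine ⟨hp, fun z => ⟨Or.inl, ?_⟩⟩
    rintro (hz | ⟨a', h1, h2, rfl⟩)
    · exact hz
    · have h3 := pv_le_sq_cube (le_trans ha h1) hb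
      omega
  | succ fuel ih =>
    intro a run ha hf hp hbound
    simp only [pvRun]
    split
    · rename_i h
      have hbound' : ∀ z ∈ run ++ [a * a * (b * b * b)], z < (a + 1) * (a + 1) * (b * b * b) := by
        intro z hz
        have hstep : a * a * (b * b * b) < (a + 1) * (a + 1) * (b * b * b) := by
          have := pv_sq_strict ha (by omega : a < a + 1) hb
          rw [pv_group, pv_group]
          omega
        rcases List.mem_append.mp hz with hz' | hz'
        · exact lt_trans (hbound z hz') hstep
        · simp at hz'; omega
      have hp' : (run ++ [a * a * (b * b * b)]).Pairwise (· < ·) := by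
        rw [List.pairwise_append]
        exact ⟨hp, by simp, by intro z hz w hw; simp at hw; subst hw; exact hbound z hz⟩
      obtain ⟨hq, hm⟩ := ih (a + 1) _ (by omega) (by omega) hp' hbound'
      refine ⟨hq, fun z => ?_⟩
      rw [hm z, List.mem_append]
      constructor
      · rintro ((hz | hz) | ⟨a', h1, h2, rfl⟩)
        · exact Or.inl hz
        · simp at hz
          exact Or.inr ⟨a, le_refl a, by rw [← pv_group]; exact h, by rw [← pv_group]; exact hz⟩
        · exact Or.inr ⟨a', by omega, h2, rfl⟩
      · rintro (hz | ⟨a', h1, h2, rfl⟩)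
        · exact Or.inl (Or.inl hz)
        · rcases lt_or_eq_of_le h1 with h' | rfl
          · exact Or.inr ⟨a', by omega, h2, rfl⟩
          · exact Or.inl (Or.inr (by simp [pv_group]))
    · rename_i h
      refine ⟨hp, fun z => ⟨Or.inl, ?_⟩⟩
      rintro (hz | ⟨a', h1, h2, rfl⟩)
      · exact hz
      · rw [pv_group] at h
        have := pv_sq_mono ha h1 hb
        omega

theorem pvRuns_spec (fuel : Nat) (N : Int) :
    ∀ (b : Int) (runs : List (List Int)), 1 ≤ b → N + 1 - b ≤ fuel →
      (∀ r ∈ runs, r.Pairwise (· < ·)) →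
      (∀ r ∈ pvRuns fuel N b runs, r.Pairwise (· < ·)) ∧
      (∀ z, (∃ r ∈ pvRuns fuel N b runs, z ∈ r) ↔
        (∃ r ∈ runs, z ∈ r) ∨
          ∃ c a : Int, b ≤ c ∧ 1 ≤ a ∧ a * a * c * c * c ≤ N ∧ z = a * a * c * c * c) := by
  induction fuel with
  | zero =>
    intro b runs hb hf h
    simp only [pvRuns]
    refine ⟨h, fun z => ⟨Or.inl, ?_⟩⟩
    rintro (hz | ⟨c, a, h1, h2, h3, rfl⟩)
    · exact hz
    · have h4 : b ≤ b * b * b := by nlinarith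
      have h5 := pv_cube_mono hb h1 h2
      omega
  | succ fuel ih =>
    intro b runs hb hf h
    simp only [pvRuns]
    split
    · rename_i hg
      have hN : 1 ≤ N := by have : b ≤ b * b * b := by nlinarith
                            omega
      obtain ⟨hrp, hrm⟩ := pvRun_spec (N + 1).toNat N b hb 1 [] (by omega) (by omega)
        (by simp) (by simp)
      have h' : ∀ r ∈ runs ++ [pvRun (N + 1).toNat N b 1 []], r.Pairwise (· < ·) := by
        intro r hr
        rcases List.mem_append.mp hr with hr' | hr'
        · exact h r hr'
        · simp at hr'; subst hr'; exact hrp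
      obtain ⟨hq, hm⟩ := ih (b + 1) _ (by omega) (by omega) h'
      refine ⟨hq, fun z => ?_⟩
      rw [hm z]
      constructor
      · rintro (⟨r, hr, hz⟩ | ⟨c, a, h1, h2, h3, rfl⟩)
        · rcases List.mem_append.mp hr with hr' | hr'
          · exact Or.inl ⟨r, hr', hz⟩
          · simp at hr'; subst hr'
            rcases (hrm z).mp hz with hz' | ⟨a', h1, h2, rfl⟩
            · simp at hz'
            · exact Or.inr ⟨b, a', le_refl b, h1, h2, rfl⟩
        · exact Or.inr ⟨c, a, by omega, h2, h3, rfl⟩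
      · rintro (⟨r, hr, hz⟩ | ⟨c, a, h1, h2, h3, rfl⟩)
        · exact Or.inl ⟨r, List.mem_append.mpr (Or.inl hr), hz⟩
        · rcases lt_or_eq_of_le h1 with h'' | heq
          · exact Or.inr ⟨c, a, by omega, h2, h3, rfl⟩
          · subst heq
            refine Or.inl ⟨pvRun (N + 1).toNat N b 1 [], List.mem_append.mpr (Or.inr (by simp)), ?_⟩
            exact (hrm _).mpr (Or.inr ⟨a, h2, h3, rfl⟩)
    · rename_i hg
      refine ⟨h, fun z => ⟨Or.inl, ?_⟩⟩
      rintro (hz | ⟨c, a, h1, h2, h3, rfl⟩)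
      · exact hz
      · exact absurd h3 (by have := pv_cube_mono hb h1 h2; omega)

-- ===== VERDICT (by name: the statement is the Claim_ definition above) =====
theorem powerful_numbers_up_to_spec : Claim_equal_powerful_numbers_up_to := by
  intro N _
  unfold Spec_powerful_numbers_up_to powerful_numbers_up_to powerful_numbers_up_to_alt
  by_cases hN : N < 1
  · rw [if_pos hN]
    have hruns : pvRuns (N + 1).toNat N 1 [] = [] := by
      cases hfe : (N + 1).toNat with
      | zero => rfl
      | succ fuel =>
        simp only [pvRuns]
        rw [if_neg (by omega : ¬(1 * 1 * 1 : Int) ≤ N)]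
    simp [hruns]
  · rw [if_neg hN]
    have hN1 : 1 ≤ N := by omega
    obtain ⟨hq, hm⟩ := pvRuns_spec (N + 1).toNat N 1 [] (by omega) (by omega) (by simp)
    -- the run list is nonempty: 1 = 1²·1³ belongs to some run
    have h1mem : ∃ r ∈ pvRuns (N + 1).toNat N 1 [], (1:Int) ∈ r := by
      refine (hm 1).mpr (Or.inr ⟨1, 1, le_refl 1, le_refl 1, by norm_num; omega, by norm_num⟩)
    have hne : pvRuns (N + 1).toNat N 1 [] ≠ [] := by
      obtain ⟨r, hr, _⟩ := h1mem
      intro h0; rw [h0] at hr; simp at hr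
    rw [if_neg hne]
    obtain ⟨r, hrounds, hrp, hrm⟩ :=
      pvRounds_spec (pvRuns (N + 1).toNat N 1 []).length (pvRuns (N + 1).toNat N 1 []) hne
        (le_refl _) hq
    rw [hrounds]
    simp only [List.headD_cons]
    -- r has the same members as A's set, both without duplicates, r strictly increasing
    have hrm' : ∀ z, z ∈ r ↔
        z ∈ pvAOuter (N + 1).toNat N 1 (PySem.Set.empty : PySem.Set Int) := by
      intro z
      rw [hrm z, hm z, pvAOuter_mem (N + 1).toNat N 1 _ (by omega) (by omega)]
      constructor
      · rintro (hz | ⟨c, a, h1, h2, h3, rfl⟩)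
        · simp at hz
        · exact Or.inr ⟨c, a, h1, h2, h3, rfl⟩
      · rintro (hz | ⟨c, a, h1, h2, h3, rfl⟩)
        · simp [PySem.Set.empty] at hz
        · exact Or.inr ⟨c, a, h1, h2, h3, rfl⟩
    have hnodupA : (pvAOuter (N + 1).toNat N 1 (PySem.Set.empty : PySem.Set Int)).Nodup :=
      pvAOuter_nodup _ N 1 _ List.nodup_nil
    have hnodupr : r.Nodup := hrp.imp (fun h => ne_of_lt h)
    have hperm : r.Perm (pvAOuter (N + 1).toNat N 1 (PySem.Set.empty : PySem.Set Int)) :=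
      (List.perm_ext_iff_of_nodup hnodupr hnodupA).mpr hrm'
    exact PySem.List.sorted_eq_of_perm_of_pairwise_lt _ _ _ hperm hrp
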